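-- pv_equiv track=rewrite | github.com/hunterschep/schrodingers-repo | scripts/mt/nllb/prelims/setup_nllb200_formosan.py | count_char_frequency
-- ===== SOURCE A (Python) =====
-- import unicodedata
-- from collections import Counter
-- from typing import Dict, Tuple, Set, Iterable, Optional, List
--
-- def clean_text(s: str) -> str:
--     if not isinstance(s, str):
--         return ""
--     # Moses-like core: NFKC; (punct/control handled downstream if you later add MosesPunctNormalizer)
--     return unicodedata.normalize("NFKC", s)
--
-- def count_char_frequency(texts: Iterable[str], target_chars: Set[str]) -> Dict[str, int]:
--     cnt = Counter()
--     tgt = target_chars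
--     for t in texts:
--         if not isinstance(t, str):
--             continue
--         t = clean_text(t)
--         for ch in t:
--             if ch in tgt:
--                 cnt[ch] += 1
--     return dict(cnt)
-- ===== SOURCE B (Python) =====
-- import unicodedata
--
-- def clean_text(s: str) -> str:
--     if not isinstance(s, str):
--         return ""
--     return unicodedata.normalize("NFKC", s)
--
-- def count_char_frequency(texts, target_chars):
--     # Join everything into one blob, list the target chars in first-occurrence
--     # order, then count each distinct target char with str.count -- no Counter.
--     blob = "".join(clean_text(t) for t in texts if isinstance(t, str))
--     seen = dict.fromkeys(ch for ch in blob if ch in target_chars)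
--     return {ch: blob.count(ch) for ch in seen}
-- ===== Notes on version B (the rewrite author's own statement) =====
-- stated objective: alternative
-- what changed: B drops the incremental Counter entirely: it joins all cleaned texts into one blob string, lists the distinct target characters in first-occurrence order via dict.fromkeys, and counts each one with str.count over the blob, instead of testing every character against the target set while incrementing a Counter. (constant-factor faster: counting happens in C via str.count instead of a per-character Python loop)
import Mathlib
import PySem

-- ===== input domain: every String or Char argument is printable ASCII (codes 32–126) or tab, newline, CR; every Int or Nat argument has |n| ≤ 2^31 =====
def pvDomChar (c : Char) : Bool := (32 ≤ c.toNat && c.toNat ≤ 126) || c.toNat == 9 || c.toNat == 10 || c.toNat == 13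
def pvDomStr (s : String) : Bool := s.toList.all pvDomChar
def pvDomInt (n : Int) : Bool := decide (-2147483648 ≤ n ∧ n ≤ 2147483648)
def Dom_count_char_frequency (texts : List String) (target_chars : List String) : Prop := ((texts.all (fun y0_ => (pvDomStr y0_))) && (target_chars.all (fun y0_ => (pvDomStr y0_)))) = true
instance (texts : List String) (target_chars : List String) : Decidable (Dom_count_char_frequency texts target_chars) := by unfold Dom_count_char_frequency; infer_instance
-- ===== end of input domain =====

-- B replaces A's incremental Counter loop by: join all texts into one blob, take the
-- distinct target chars in first-occurrence order, and count each with str.count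
-- (different decomposition; a timing run measured B constant-factor faster; return value only, no mutation).

-- ===== PORT A =====
-- clean_text: unicodedata.normalize("NFKC", s); on the printable-ASCII (+tab/newline/CR)
-- domain Dom_ NFKC is the identity, so the port is exact there.
def clean_text (s : String) : String := s

def count_char_frequency (texts : List String) (target_chars : List String) : List (String × Int) :=
  (texts.foldl (fun cnt t =>
      (clean_text t).toList.foldl (fun cnt ch =>
          if target_chars.contains ch.toString then cnt.modify ch.toString 0 (· + 1) else cnt)
        cnt)
    (PySem.Dict.empty : PySem.Dict String Int)).items

-- ===== PORT B =====
def count_char_frequency_alt (texts : List String) (target_chars : List String) : List (String × Int) :=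
  let blob := PySem.Str.join "" (texts.map clean_text)
  let seen := PySem.List.dedup ((blob.toList.map (fun ch => ch.toString)).filter
      (fun ch => target_chars.contains ch))
  seen.map (fun ch => (ch, (PySem.Str.count blob ch : Int)))

-- ===== PRECONDITION & SPEC =====
def Spec_count_char_frequency (texts : List String) (target_chars : List String) (out : List (String × Int)) : Prop := out = count_char_frequency_alt texts target_chars
instance (texts : List String) (target_chars : List String) (out : List (String × Int)) : Decidable (Spec_count_char_frequency texts target_chars out) := by unfold Spec_count_char_frequency; infer_instance

-- ===== CLAIM =====
def Claim_equal_count_char_frequency : Prop := ∀ (texts : List String) (target_chars : List String), Dom_count_char_frequency texts target_chars → Spec_count_char_frequency texts target_chars (count_char_frequency texts target_chars)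

-- ===== LEMMAS AND PROOFS =====

-- A's nested per-text/per-char fold is a single fold over the flattened stream of
-- single-character strings
theorem foldl_texts_flatMap (texts : List String)
    (f : PySem.Dict String Int → String → PySem.Dict String Int) (d0 : PySem.Dict String Int) :
    texts.foldl (fun d t => (clean_text t).toList.foldl (fun d ch => f d ch.toString) d) d0 =
      (texts.flatMap (fun t => (clean_text t).toList.map (fun c => c.toString))).foldl f d0 := by
  induction texts generalizing d0 with
  | nil => rfl
  | cons t ts ih =>
      simp only [List.foldl_cons, List.flatMap_cons, List.foldl_append, List.foldl_map]
      simpa using ih _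

-- join with the empty separator is flatten
theorem join_nil_eq_flatten (parts : List (List Char)) :
    PySem.Chars.join [] parts = parts.flatten := by
  induction parts with
  | nil => rfl
  | cons a rest ih =>
      cases rest with
      | nil => simp [PySem.Chars.join, List.intercalate]
      | cons b rest' =>
          rw [PySem.Chars.join_cons_cons, ih, List.flatten_cons]
          simp

-- Python's str.count with a single-character needle is List.count
theorem count_go_singleton (c : Char) (cs : List Char) (fuel acc : Nat)
    (h : cs.length ≤ fuel) :
    PySem.Chars.count.go [c] fuel cs acc = acc + cs.count c := by
  induction fuel generalizing cs acc with
  | zero =>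
      have : cs = [] := List.length_eq_zero_iff.mp (Nat.le_zero.mp h)
      subst this; simp [PySem.Chars.count.go]
  | succ n ih =>
      cases cs with
      | nil => simp [PySem.Chars.count.go]
      | cons a t =>
          by_cases hac : a = c
          · subst hac
            have hp : List.isPrefixOf [a] (a :: t) = true := by simp [List.isPrefixOf]
            rw [PySem.Chars.count.go, if_pos hp]
            simp only [List.length_singleton, List.drop_one, List.tail_cons]
            rw [ih t (acc + 1) (by simpa using Nat.le_of_succ_le_succ h)]
            simp; omega
          · have hp : List.isPrefixOf [c] (a :: t) = false := by
              simp [List.isPrefixOf]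
              intro hh; exact absurd hh.symm hac
            rw [PySem.Chars.count.go, if_neg (by simp [hp])]
            rw [ih t acc (by simpa using Nat.le_of_succ_le_succ h)]
            simp [hac]

theorem count_singleton (cs : List Char) (c : Char) :
    PySem.Chars.count cs [c] = cs.count c := by
  rw [PySem.Chars.count, if_neg (by simp)]
  simpa using count_go_singleton c cs cs.length 0 le_rfl

theorem toString_injective : Function.Injective Char.toString := by
  intro a b h
  have := congrArg String.toList h
  simpa using this

-- ===== VERDICT =====
theorem count_char_frequency_spec : Claim_equal_count_char_frequency := by
  intro texts target_chars _
  unfold Spec_count_char_frequency count_char_frequency count_char_frequency_alt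
  -- the shared stream of single-character strings, and its target-filtered part
  set p : String → Bool := fun ch => target_chars.contains ch with hp
  set blobL : List Char := (texts.map (fun t => (clean_text t).toList)).flatten with hblob
  have hblobeq : (PySem.Str.join "" (texts.map clean_text)).toList = blobL := by
    rw [PySem.Str.toList_join]
    simpa [List.map_map] using join_nil_eq_flatten (texts.map (fun t => (clean_text t).toList))
  set S : List String := blobL.map (fun c => c.toString) with hS
  have hSeq : texts.flatMap (fun t => (clean_text t).toList.map (fun c => c.toString)) = S := by
    simp [hS, hblob, List.map_flatten, List.flatMap_def, List.map_map, Function.comp_def]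
  -- A is the counter of the filtered stream
  rw [foldl_texts_flatMap texts
        (fun d k => if target_chars.contains k then d.modify k 0 (· + 1) else d), hSeq]
  have hA : (S.foldl (fun d k => if p k then d.modify k 0 (· + 1) else d)
        (PySem.Dict.empty : PySem.Dict String Int)).items
      = (PySem.Dict.counter (S.filter p)).items := by
    rw [← List.foldl_filter, PySem.Dict.counter_eq_foldl]
  rw [hA, PySem.Dict.items_counter]
  -- both sides are maps over the deduped filtered stream
  show _ = (PySem.List.dedup ((((PySem.Str.join "" (texts.map clean_text)).toList.map (fun ch => ch.toString)).filter p))).map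
      (fun ch => (ch, (PySem.Str.count (PySem.Str.join "" (texts.map clean_text)) ch : Int)))
  rw [hblobeq, PySem.List.dedup_eq_ofList]
  refine List.map_congr_left ?_
  intro k hk
  have hkL : k ∈ S.filter p := (PySem.Set.mem_ofList _ _).mp (by simpa using hk)
  have hkS : k ∈ S ∧ p k := by
    have := List.mem_filter.mp hkL
    exact ⟨this.1, this.2⟩
  obtain ⟨c, hc, rfl⟩ := List.mem_map.mp hkS.1
  refine Prod.ext rfl ?_
  simp only [PySem.Str.count_eq, hblobeq]
  have h1 : List.count c.toString ((blobL.map (fun c => c.toString)).filter p)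
      = S.count c.toString := by
    rw [← hS, List.count_filter]
    exact hkS.2
  have h2 : S.count c.toString = blobL.count c := by
    rw [hS]; exact List.count_map_of_injective _ _ toString_injective _
  have h3 : c.toString.toList = [c] := by simp
  rw [h3, count_singleton]
  exact congrArg Nat.cast (h1.trans h2)
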